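-- pv_equiv track=rewrite | github.com/Poco-dev/python_mipt_dafe_tasks | solutions/sem01/lesson04/task1.py | is_arithmetic_progression
-- ===== SOURCE A (Python) =====
-- def is_arithmetic_progression(lst: list[list[int]]) -> bool:
--     if len(lst) == 1 or len(lst) == 0:
--         return True
--     lst.sort()
--     k = lst[1] - lst[0]
--     for i in range(len(lst) - 1):
--         if (lst[i + 1] - lst[i]) != k:
--             return False
--     return True
-- ===== SOURCE B (Python) =====
-- def is_arithmetic_progression(lst: list[int]) -> bool:
--     # O(n) min/max + set membership; does not mutate lst (A sorts it in place);
--     # return value is identical to A's.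
--     n = len(lst)
--     if n <= 1:
--         return True
--     mn = min(lst)
--     mx = max(lst)
--     if (mx - mn) % (n - 1) != 0:
--         return False
--     d = (mx - mn) // (n - 1)
--     if d == 0:
--         return True
--     seen = set(lst)
--     if len(seen) != n:
--         return False
--     return all(mn + i * d in seen for i in range(n))
-- ===== Notes on version B (the rewrite author's own statement) =====
-- stated objective: faster
-- what changed: Replaces sort-then-scan-adjacent-differences with an O(n) min/max + set-membership check (expected terms mn + i*d must all be present and elements distinct unless d=0); B also does not mutate the input list, which A sorts in place.
import Mathlib
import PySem

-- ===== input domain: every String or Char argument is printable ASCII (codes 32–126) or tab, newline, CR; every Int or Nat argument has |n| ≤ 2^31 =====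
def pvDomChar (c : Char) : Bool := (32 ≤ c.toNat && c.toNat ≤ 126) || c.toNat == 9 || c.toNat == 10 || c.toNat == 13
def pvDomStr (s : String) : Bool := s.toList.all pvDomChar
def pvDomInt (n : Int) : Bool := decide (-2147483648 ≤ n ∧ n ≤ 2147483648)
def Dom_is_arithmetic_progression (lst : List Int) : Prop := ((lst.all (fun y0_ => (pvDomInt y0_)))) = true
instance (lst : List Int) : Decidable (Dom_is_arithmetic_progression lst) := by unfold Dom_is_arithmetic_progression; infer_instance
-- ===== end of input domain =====

-- B replaces A's sort-then-adjacent-differences check by an O(n) min/max + set-membership check;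
-- equivalence is about the RETURN value only (A sorts the input list in place, B does not mutate it).


-- ===== PORT A =====
def is_arithmetic_progression (lst : List Int) : Bool :=
  if lst.length = 1 ∨ lst.length = 0 then true
  else
    let s := PySem.List.sorted lst (fun x => x) false
    let k := PySem.List.pyGetD s 1 0 - PySem.List.pyGetD s 0 0
    (PySem.List.pyRange 0 (PySem.List.len s - 1) 1).all
      (fun i => !(decide (PySem.List.pyGetD s (i + 1) 0 - PySem.List.pyGetD s i 0 ≠ k)))

-- ===== PORT B =====
def is_arithmetic_progression_alt (lst : List Int) : Bool :=
  let n := lst.length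
  if n ≤ 1 then true
  else
    let mn := (PySem.List.min? lst (fun x => x)).getD 0
    let mx := (PySem.List.max? lst (fun x => x)).getD 0
    if PySem.Int.mod (mx - mn) ((n : Int) - 1) ≠ 0 then false
    else
      let d := PySem.Int.floordiv (mx - mn) ((n : Int) - 1)
      if d = 0 then true
      else
        let seen := PySem.Set.ofList lst
        if seen.length ≠ n then false
        else (PySem.List.pyRange 0 (n : Int) 1).all
          (fun i => PySem.Set.contains seen (mn + i * d))

-- ===== PRECONDITION & SPEC =====
def Spec_is_arithmetic_progression (lst : List Int) (out : Bool) : Prop := out = is_arithmetic_progression_alt lst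
instance (lst : List Int) (out : Bool) : Decidable (Spec_is_arithmetic_progression lst out) := by unfold Spec_is_arithmetic_progression; infer_instance

-- ===== CLAIM (what is proved, stated in full; the proofs are below) =====
def Claim_equal_is_arithmetic_progression : Prop := ∀ (lst : List Int), Dom_is_arithmetic_progression lst → Spec_is_arithmetic_progression lst (is_arithmetic_progression lst)

-- ===== LEMMAS AND PROOFS =====

-- arithmetic-progression predicate on an explicit list (getD form, proof-free indices)
def APd (s : List Int) (k : Int) : Prop :=
  ∀ i : Nat, i + 1 < s.length → s.getD (i+1) 0 = s.getD i 0 + k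

theorem ap_closed {s : List Int} {k : Int} (hap : APd s k) :
    ∀ i : Nat, i < s.length → s.getD i 0 = s.getD 0 0 + i * k := by
  intro i
  induction i with
  | zero => intro _; simp
  | succ j ih =>
    intro hi
    rw [hap j hi, ih (by omega)]
    push_cast; ring

theorem all_diff_iff (s : List Int) (k : Int) :
    ((PySem.List.pyRange 0 (PySem.List.len s - 1) 1).all
      (fun i => !(decide (PySem.List.pyGetD s (i + 1) 0 - PySem.List.pyGetD s i 0 ≠ k)))) = true
    ↔ APd s k := by
  rw [List.all_eq_true]
  constructor
  · intro h i hi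
    have hx := h (i : Int) (by
      rw [PySem.List.mem_pyRange_one]
      constructor
      · positivity
      · simp [PySem.List.len_eq]; omega)
    simp only [Bool.not_eq_eq_eq_not, Bool.not_true, decide_eq_false_iff_not, not_not] at hx
    have h1 : PySem.List.pyGetD s ((i : Int) + 1) 0 = s.getD (i+1) 0 := by
      rw [show (i : Int) + 1 = ((i + 1 : Nat) : Int) from by omega, PySem.List.pyGetD_natCast]
    have h2 : PySem.List.pyGetD s (i : Int) 0 = s.getD i 0 := by
      rw [PySem.List.pyGetD_natCast]
    rw [h1, h2] at hx
    omega
  · intro hap x hx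
    rw [PySem.List.mem_pyRange_one] at hx
    simp only [PySem.List.len_eq] at hx
    obtain ⟨hx0, hx1⟩ := hx
    have hi : x.toNat + 1 < s.length := by omega
    have h1 : PySem.List.pyGetD s (x + 1) 0 = s.getD (x.toNat + 1) 0 := by
      rw [show x + 1 = ((x.toNat + 1 : Nat) : Int) from by omega, PySem.List.pyGetD_natCast]
    have h2 : PySem.List.pyGetD s x 0 = s.getD x.toNat 0 := by
      conv_lhs => rw [show x = ((x.toNat : Nat) : Int) from by omega]
      rw [PySem.List.pyGetD_natCast]
    simp only [Bool.not_eq_eq_eq_not, Bool.not_true, decide_eq_false_iff_not, not_not]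
    rw [h1, h2, hap x.toNat hi]
    ring

theorem ofList_length_iff (xs : List Int) :
    (PySem.Set.ofList xs).length = xs.length ↔ xs.Nodup := by
  have hnd : (PySem.Set.ofList xs).Nodup := PySem.Set.nodup_ofList xs
  have hsub : PySem.Set.ofList xs ⊆ xs := fun x hx => (PySem.Set.mem_ofList xs x).mp hx
  have hsp : (PySem.Set.ofList xs).Subperm xs := hnd.subperm hsub
  constructor
  · intro h
    exact ((hsp.perm_of_length_le (by omega)).nodup_iff).mp hnd
  · intro h
    have hsub' : xs ⊆ PySem.Set.ofList xs := fun x hx => (PySem.Set.mem_ofList xs x).mpr hx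
    have hsp' : xs.Subperm (PySem.Set.ofList xs) := h.subperm hsub'
    have := hsp.length_le
    have := hsp'.length_le
    omega

theorem sorted_getD_mono (lst : List Int) (i j : Nat) (hij : i ≤ j) (hj : j < lst.length) :
    (PySem.List.sorted lst (fun x => x) false).getD i 0
      ≤ (PySem.List.sorted lst (fun x => x) false).getD j 0 := by
  rw [List.getD_eq_getElem _ _ (by rw [PySem.List.length_sorted]; omega),
      List.getD_eq_getElem _ _ (by rw [PySem.List.length_sorted]; omega)]
  exact PySem.List.sorted_id_getElem_mono lst hij (by rw [PySem.List.length_sorted]; omega)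

theorem min_eq_head (lst : List Int) (h0 : 0 < lst.length) :
    (PySem.List.min? lst (fun x => x)).getD 0
      = (PySem.List.sorted lst (fun x => x) false).getD 0 0 := by
  have hne : lst ≠ [] := by intro h; simp [h] at h0
  have hlen : (PySem.List.sorted lst (fun x => x) false).length = lst.length :=
    PySem.List.length_sorted lst _ false
  cases hm : PySem.List.min? lst (fun x => x) with
  | none => exact absurd ((PySem.List.min?_eq_none_iff lst _).mp hm) hne
  | some m =>
    have hmem : m ∈ lst := PySem.List.min?_mem hm
    have hmin : ∀ y ∈ lst, m ≤ y := PySem.List.min?_isMin hm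
    have hs0 : (PySem.List.sorted lst (fun x => x) false).getD 0 0 ∈ lst := by
      rw [← PySem.List.mem_sorted lst (fun x => x) false,
          List.getD_eq_getElem _ _ (by omega)]
      exact List.getElem_mem _
    have hmm : m ∈ PySem.List.sorted lst (fun x => x) false :=
      (PySem.List.mem_sorted lst (fun x => x) false m).mpr hmem
    obtain ⟨j, hj, hjm⟩ := List.getElem_of_mem hmm
    have hle : (PySem.List.sorted lst (fun x => x) false).getD 0 0 ≤ m := by
      rw [← hjm, List.getD_eq_getElem _ _ (by omega)]
      exact PySem.List.sorted_id_getElem_mono lst (Nat.zero_le j) hj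
    simp only [Option.getD_some]
    exact le_antisymm (hmin _ hs0) hle

theorem max_eq_last (lst : List Int) (h0 : 0 < lst.length) :
    (PySem.List.max? lst (fun x => x)).getD 0
      = (PySem.List.sorted lst (fun x => x) false).getD (lst.length - 1) 0 := by
  have hne : lst ≠ [] := by intro h; simp [h] at h0
  have hlen : (PySem.List.sorted lst (fun x => x) false).length = lst.length :=
    PySem.List.length_sorted lst _ false
  cases hm : PySem.List.max? lst (fun x => x) with
  | none => exact absurd ((PySem.List.max?_eq_none_iff lst _).mp hm) hne
  | some m =>
    have hmem : m ∈ lst := PySem.List.max?_mem hm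
    have hmax : ∀ y ∈ lst, y ≤ m := PySem.List.max?_isMax hm
    have hsl : (PySem.List.sorted lst (fun x => x) false).getD (lst.length - 1) 0 ∈ lst := by
      rw [← PySem.List.mem_sorted lst (fun x => x) false,
          List.getD_eq_getElem _ _ (by omega)]
      exact List.getElem_mem _
    have hmm : m ∈ PySem.List.sorted lst (fun x => x) false :=
      (PySem.List.mem_sorted lst (fun x => x) false m).mpr hmem
    obtain ⟨j, hj, hjm⟩ := List.getElem_of_mem hmm
    have hle : m ≤ (PySem.List.sorted lst (fun x => x) false).getD (lst.length - 1) 0 := by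
      rw [← hjm, List.getD_eq_getElem _ _ (by omega)]
      exact PySem.List.sorted_id_getElem_mono lst (by omega) (by omega)
    simp only [Option.getD_some]
    exact le_antisymm hle (hmax _ hsl)

theorem main_equiv (lst : List Int) :
    is_arithmetic_progression lst = is_arithmetic_progression_alt lst := by
  by_cases hn : lst.length ≤ 1
  · have h01 : lst.length = 1 ∨ lst.length = 0 := by omega
    unfold is_arithmetic_progression is_arithmetic_progression_alt
    rw [if_pos h01, if_pos hn]
  · have hn2 : 2 ≤ lst.length := by omega
    have hlen : (PySem.List.sorted lst (fun x => x) false).length = lst.length :=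
      PySem.List.length_sorted lst _ false
    set s := PySem.List.sorted lst (fun x => x) false with hsdef
    have hperm : s.Perm lst := PySem.List.sorted_perm lst _ false
    set n := lst.length with hndef
    have hmono : ∀ i j : Nat, i ≤ j → j < n → s.getD i 0 ≤ s.getD j 0 :=
      fun i j hij hj => sorted_getD_mono lst i j hij hj
    have hmnmx : s.getD 0 0 ≤ s.getD (n - 1) 0 := hmono 0 (n - 1) (by omega) (by omega)
    -- characterization of A
    have hA : is_arithmetic_progression lst = true ↔ APd s (s.getD 1 0 - s.getD 0 0) := by
      have e : is_arithmetic_progression lst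
          = ((PySem.List.pyRange 0 (PySem.List.len s - 1) 1).all
              (fun i => !(decide (PySem.List.pyGetD s (i + 1) 0 - PySem.List.pyGetD s i 0
                ≠ (PySem.List.pyGetD s 1 0 - PySem.List.pyGetD s 0 0))))) := by
        unfold is_arithmetic_progression
        rw [if_neg (by omega)]
      have e1 : PySem.List.pyGetD s 1 0 = s.getD 1 0 := by
        rw [show (1 : Int) = ((1 : Nat) : Int) from by norm_num, PySem.List.pyGetD_natCast]
      have e0 : PySem.List.pyGetD s 0 0 = s.getD 0 0 := by
        rw [show (0 : Int) = ((0 : Nat) : Int) from by norm_num, PySem.List.pyGetD_natCast]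
      rw [e, e1, e0]
      exact all_diff_iff s _
    -- characterization of B
    have eAlt : is_arithmetic_progression_alt lst
        = (if PySem.Int.mod (s.getD (n - 1) 0 - s.getD 0 0) ((n : Int) - 1) ≠ 0 then false
           else if PySem.Int.floordiv (s.getD (n - 1) 0 - s.getD 0 0) ((n : Int) - 1) = 0 then true
           else if (PySem.Set.ofList lst).length ≠ n then false
           else (PySem.List.pyRange 0 (n : Int) 1).all
             (fun i => PySem.Set.contains (PySem.Set.ofList lst)
               (s.getD 0 0 + i * PySem.Int.floordiv (s.getD (n - 1) 0 - s.getD 0 0) ((n : Int) - 1)))) := by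
      have e : is_arithmetic_progression_alt lst
          = (if PySem.Int.mod ((PySem.List.max? lst (fun x => x)).getD 0
                - (PySem.List.min? lst (fun x => x)).getD 0) ((n : Int) - 1) ≠ 0 then false
             else if PySem.Int.floordiv ((PySem.List.max? lst (fun x => x)).getD 0
                - (PySem.List.min? lst (fun x => x)).getD 0) ((n : Int) - 1) = 0 then true
             else if (PySem.Set.ofList lst).length ≠ n then false
             else (PySem.List.pyRange 0 (n : Int) 1).all
               (fun i => PySem.Set.contains (PySem.Set.ofList lst)
                 ((PySem.List.min? lst (fun x => x)).getD 0
                   + i * PySem.Int.floordiv ((PySem.List.max? lst (fun x => x)).getD 0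
                       - (PySem.List.min? lst (fun x => x)).getD 0) ((n : Int) - 1)))) := by
        unfold is_arithmetic_progression_alt
        rw [if_neg hn]
      rw [e, min_eq_head lst (by omega), max_eq_last lst (by omega)]
    by_cases hdvd : PySem.Int.mod (s.getD (n - 1) 0 - s.getD 0 0) ((n : Int) - 1) = 0
    · have hd : ((n : Int) - 1) ∣ (s.getD (n - 1) 0 - s.getD 0 0) :=
        (PySem.Int.mod_eq_zero_iff_dvd _ _).mp hdvd
      have hpos : (0 : Int) < (n : Int) - 1 := by omega
      set dd := PySem.Int.floordiv (s.getD (n - 1) 0 - s.getD 0 0) ((n : Int) - 1) with hdd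
      have hdede : dd = (s.getD (n - 1) 0 - s.getD 0 0) / ((n : Int) - 1) := by
        rw [hdd, PySem.Int.floordiv_eq_ediv_of_pos hpos]
      have hspan : ((n : Int) - 1) * dd = s.getD (n - 1) 0 - s.getD 0 0 := by
        rw [hdede]; exact Int.mul_ediv_cancel' hd
      have hd0 : 0 ≤ dd := by
        rw [hdede]; exact Int.ediv_nonneg (by omega) (by omega)
      -- shared fact: if A's property holds then its common difference equals dd
      have hkd : APd s (s.getD 1 0 - s.getD 0 0) → s.getD 1 0 - s.getD 0 0 = dd := by
        intro hap
        have hclosed := ap_closed hap (n - 1) (by omega)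
        have hc' : ((n : Int) - 1) * (s.getD 1 0 - s.getD 0 0)
            = s.getD (n - 1) 0 - s.getD 0 0 := by
          rw [hclosed]
          have : (((n - 1 : Nat)) : Int) = (n : Int) - 1 := by omega
          rw [this]; ring
        have heq : ((n : Int) - 1) * (s.getD 1 0 - s.getD 0 0) = ((n : Int) - 1) * dd := by
          rw [hc', hspan]
        exact mul_left_cancel₀ (by omega) heq
      by_cases hz : dd = 0
      · rw [eAlt, if_neg (by simpa using hdvd), if_pos hz]
        apply hA.mpr
        have hmxmn : s.getD (n - 1) 0 = s.getD 0 0 := by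
          have := hspan; rw [hz] at this; omega
        have hconst : ∀ j : Nat, j < n → s.getD j 0 = s.getD 0 0 := by
          intro j hj
          refine le_antisymm ?_ (hmono 0 j (by omega) hj)
          exact le_trans (hmono j (n - 1) (by omega) (by omega)) (le_of_eq hmxmn)
        intro i hi
        have hsl : s.length = n := hlen
        rw [hconst (i + 1) (by omega), hconst i (by omega), hconst 1 (by omega)]
        ring
      · have hdpos : 0 < dd := lt_of_le_of_ne hd0 (Ne.symm hz)
        by_cases hcard : (PySem.Set.ofList lst).length = n
        · rw [eAlt, if_neg (by simpa using hdvd), if_neg hz, if_neg (by simpa using hcard)]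
          have hnodup : lst.Nodup := (ofList_length_iff lst).mp hcard
          have hiff : is_arithmetic_progression lst = true ↔
              ((PySem.List.pyRange 0 (n : Int) 1).all
                (fun i => PySem.Set.contains (PySem.Set.ofList lst)
                  (s.getD 0 0 + i * dd))) = true := by
            constructor
            · intro hAv
              have hap := hA.mp hAv
              have hk1 : s.getD 1 0 - s.getD 0 0 = dd := hkd hap
              rw [List.all_eq_true]
              intro x hx
              rw [PySem.List.mem_pyRange_one] at hx
              have hxlt : x.toNat < n := by omega
              have hclosed := ap_closed hap x.toNat (by omega)
              have hmem : s.getD 0 0 + x * dd ∈ lst := by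
                have hv : s.getD 0 0 + x * dd = s.getD x.toNat 0 := by
                  rw [hclosed, ← hk1]
                  conv_lhs => rw [show x = ((x.toNat : Nat) : Int) from by omega]
                rw [hv]
                refine hperm.subset ?_
                rw [List.getD_eq_getElem _ _ (by omega)]
                exact List.getElem_mem _
              simp only [PySem.Set.contains]
              rw [List.contains_iff_mem, PySem.Set.mem_ofList]
              exact hmem
            · intro hall
              have hmemAll : ∀ i : Nat, i < n → s.getD 0 0 + (i : Int) * dd ∈ lst := by
                intro i hi
                have hc := (List.all_eq_true.mp hall) (i : Int)
                  (by rw [PySem.List.mem_pyRange_one]; omega)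
                simp only [PySem.Set.contains] at hc
                rw [List.contains_iff_mem, PySem.Set.mem_ofList] at hc
                exact hc
              set t := (List.range n).map (fun i : Nat => s.getD 0 0 + (i : Int) * dd) with ht
              have htlen : t.length = n := by simp [ht]
              have htpw : t.Pairwise (· < ·) := by
                rw [ht]
                refine List.Pairwise.map _ ?_ List.pairwise_lt_range
                intro a b hab
                have hab' : (a : Int) < (b : Int) := by exact_mod_cast hab
                nlinarith
              have htnd : t.Nodup := htpw.imp (fun h => ne_of_lt h)
              have htsub : t ⊆ lst := by
                intro x hx
                rw [ht, List.mem_map] at hx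
                obtain ⟨i, hi, rfl⟩ := hx
                exact hmemAll i (List.mem_range.mp hi)
              have htperm : t.Perm lst := (htnd.subperm htsub).perm_of_length_le (by omega)
              have hst : s = t :=
                PySem.List.sorted_eq_of_perm_of_pairwise_lt lst t _ htperm htpw
              have g : ∀ j : Nat, j < n → t.getD j 0 = s.getD 0 0 + (j : Int) * dd := by
                intro j hj
                rw [ht, List.getD_eq_getElem _ _ (by simpa using hj),
                    List.getElem_map, List.getElem_range]
              apply hA.mpr
              intro i hi
              have hi' : i + 1 < n := by rw [← hlen]; exact hi
              conv_lhs => rw [hst]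
              conv_rhs => rw [hst]
              rw [g (i + 1) (by omega), g i (by omega), g 1 (by omega), g 0 (by omega)]
              push_cast; ring
          by_cases hBv : ((PySem.List.pyRange 0 (n : Int) 1).all
              (fun i => PySem.Set.contains (PySem.Set.ofList lst)
                (s.getD 0 0 + i * dd))) = true
          · rw [hBv, hiff.mpr hBv]
          · rw [Bool.not_eq_true] at hBv
            rw [hBv]
            cases hAv : is_arithmetic_progression lst with
            | false => rfl
            | true =>
              rw [hiff.mp hAv] at hBv
              exact absurd hBv (by simp)
        · rw [eAlt, if_neg (by simpa using hdvd), if_neg hz, if_pos (by simpa using hcard)]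
          cases hAv : is_arithmetic_progression lst with
          | false => rfl
          | true =>
            exfalso
            have hap := hA.mp hAv
            have hk1 : s.getD 1 0 - s.getD 0 0 = dd := hkd hap
            have hspw : s.Pairwise (· < ·) := by
              rw [List.pairwise_iff_getElem]
              intro i j hi hj hij
              rw [show s[i] = s.getD i 0 from (List.getD_eq_getElem _ _ hi).symm,
                  show s[j] = s.getD j 0 from (List.getD_eq_getElem _ _ hj).symm,
                  ap_closed hap i (by omega), ap_closed hap j hj]
              have hlt : (i : Int) * (s.getD 1 0 - s.getD 0 0)
                  < (j : Int) * (s.getD 1 0 - s.getD 0 0) := by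
                rw [hk1]
                have : (i : Int) < (j : Int) := by exact_mod_cast hij
                nlinarith
              linarith
            have hnd : lst.Nodup := (hperm.nodup_iff).mp (hspw.imp (fun h => ne_of_lt h))
            exact hcard ((ofList_length_iff lst).mpr hnd)
    · rw [eAlt, if_pos hdvd]
      cases hAv : is_arithmetic_progression lst with
      | false => rfl
      | true =>
        exfalso
        have hap := hA.mp hAv
        have hclosed := ap_closed hap (n - 1) (by omega)
        apply hdvd
        rw [PySem.Int.mod_eq_zero_iff_dvd]
        refine ⟨s.getD 1 0 - s.getD 0 0, ?_⟩
        rw [hclosed]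
        have : (((n - 1 : Nat)) : Int) = (n : Int) - 1 := by omega
        rw [this]; ring

-- ===== VERDICT (by name: the statement is the Claim_ definition above) =====
theorem is_arithmetic_progression_spec : Claim_equal_is_arithmetic_progression := by
  intro lst _
  exact main_equiv lst
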